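-- pv_equiv track=rewrite | github.com/chlwodnjs/Algorithm | Programmers/pg_l2_77885.py | solution
-- ===== SOURCE A (Python) =====
-- def solution(numbers):
--     answer = numbers[:]
--     for i in range(len(numbers)):
--         exp = 0
--         while numbers[i] > 0:
--             if numbers[i] % 2 == 0:
--                 break
--             else:
--                 numbers[i] //= 2
--                 exp += 1
--         answer[i] += 2 ** exp
--         if exp:
--             answer[i] -= 2 ** (exp-1)
--
--     return answer
-- ===== SOURCE B (Python) =====
-- def solution(numbers):
--     # Return-value equivalent to A; does not mutate `numbers` (A halves odd entries in place).
--     out = []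
--     for n in numbers:
--         e = (n ^ (n + 1)).bit_length() - 1 if n > 0 else 0
--         out.append(n + (1 if e == 0 else 1 << (e - 1)))
--     return out
-- ===== Notes on version B (the rewrite author's own statement) =====
-- stated objective: simpler
-- what changed: The inner halving loop that counts trailing 1-bits is replaced by the closed-form bit formula (n ^ (n+1)).bit_length() - 1, and the add-2^exp-then-subtract-2^(exp-1) pair collapses to a single added term; B builds a fresh list and does not mutate numbers in place (return values identical).
import Mathlib
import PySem

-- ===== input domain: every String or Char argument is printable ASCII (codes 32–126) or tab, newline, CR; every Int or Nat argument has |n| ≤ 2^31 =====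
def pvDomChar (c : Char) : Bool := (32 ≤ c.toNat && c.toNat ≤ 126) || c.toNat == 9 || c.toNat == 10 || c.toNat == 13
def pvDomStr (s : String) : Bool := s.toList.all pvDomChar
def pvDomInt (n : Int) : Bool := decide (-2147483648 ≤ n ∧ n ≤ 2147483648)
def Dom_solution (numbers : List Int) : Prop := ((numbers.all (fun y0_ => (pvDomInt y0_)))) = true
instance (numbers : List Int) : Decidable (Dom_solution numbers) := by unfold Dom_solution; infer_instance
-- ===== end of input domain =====

-- B replaces A's inner halving loop by the closed-form trailing-ones formula
-- (n ^ (n+1)).bit_length() - 1 (simpler, no inner loop); equivalence is about the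
-- RETURN value only: A mutates `numbers` in place (halves odd entries), B does not.


-- ===== PORT A =====
-- A's inner `while numbers[i] > 0: if even break else //= 2; exp += 1` loop;
-- returns (final value of numbers[i], exp).
def aWhile (n : Int) (exp : Nat) : Int × Nat :=
  if h : n > 0 then
    if PySem.Int.mod n 2 = 0 then (n, exp)
    else aWhile (PySem.Int.floordiv n 2) (exp + 1)
  else (n, exp)
termination_by n.toNat
decreasing_by
  have h2 : PySem.Int.floordiv n 2 = n / 2 := PySem.Int.floordiv_eq_ediv_of_pos (by omega)
  rw [h2]; omega

-- A iterates over indices; each answer[i] depends only on numbers[i], so the pass is a map.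
def solution (numbers : List Int) : List Int :=
  numbers.map (fun n =>
    let p := aWhile n 0
    let a1 := n + 2 ^ p.2
    if p.2 ≠ 0 then a1 - 2 ^ (p.2 - 1) else a1)

-- ===== PORT B =====
def solution_alt (numbers : List Int) : List Int :=
  numbers.map (fun n =>
    let e : Nat := if n > 0 then PySem.Int.bitLength (PySem.Int.bxor n (n + 1)) - 1 else 0
    n + (if e = 0 then 1 else (1 : Int) <<< (e - 1)))

-- ===== PRECONDITION & SPEC =====
def Spec_solution (numbers : List Int) (out : List Int) : Prop := out = solution_alt numbers
instance (numbers : List Int) (out : List Int) : Decidable (Spec_solution numbers out) := by unfold Spec_solution; infer_instance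

-- ===== CLAIM (what is proved, stated in full; the proofs are below) =====
def Claim_equal_solution : Prop := ∀ (numbers : List Int), Dom_solution numbers → Spec_solution numbers (solution numbers)

-- ===== LEMMAS AND PROOFS =====

-- trailing-ones count of a natural number
def tc (m : Nat) : Nat :=
  if m % 2 = 1 then tc (m / 2) + 1 else 0
termination_by m
decreasing_by omega

lemma tc_even {m : Nat} (h : m % 2 = 0) : tc m = 0 := by
  rw [tc]; simp [h]

lemma tc_odd {m : Nat} (h : m % 2 = 1) : tc m = tc (m / 2) + 1 := by
  rw [tc]; simp [h]

-- A's loop counts exactly tc of the (clamped) value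
lemma aWhile_snd (n : Int) (e : Nat) : (aWhile n e).2 = e + tc n.toNat := by
  rw [aWhile]
  split_ifs with hp hm
  · have hm' : n % 2 = 0 := by rwa [PySem.Int.mod_eq_emod_of_pos (by norm_num)] at hm
    have h2 : n.toNat % 2 = 0 := by omega
    simp [tc_even h2]
  · have hm' : n % 2 ≠ 0 := by rwa [PySem.Int.mod_eq_emod_of_pos (by norm_num)] at hm
    have hfd : PySem.Int.floordiv n 2 = n / 2 := PySem.Int.floordiv_eq_ediv_of_pos (by norm_num)
    have ih := aWhile_snd (PySem.Int.floordiv n 2) (e + 1)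
    rw [ih, hfd]
    have h1 : (n / 2).toNat = n.toNat / 2 := by omega
    have h2 : n.toNat % 2 = 1 := by omega
    rw [h1, tc_odd h2]; omega
  · have h0 : n.toNat = 0 := by omega
    simp [h0, tc_even (show 0 % 2 = 0 by decide)]
termination_by n.toNat
decreasing_by
  have h2 : PySem.Int.floordiv n 2 = n / 2 := PySem.Int.floordiv_eq_ediv_of_pos (by omega)
  rw [h2]; omega

lemma xor_double (k : Nat) : (2 * k) ^^^ (2 * k + 1) = 1 := by
  have h := Nat.xor_bit false k true k
  simpa [Nat.bit_false_apply, Nat.bit_true_apply] using h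

lemma xor_double_succ (k : Nat) : (2 * k + 1) ^^^ (2 * k + 2) = 2 * (k ^^^ (k + 1)) + 1 := by
  have h := Nat.xor_bit true k false (k + 1)
  simp only [show (true != false) = true from rfl, Nat.bit_true_apply, Nat.bit_false_apply] at h
  rw [show 2 * k + 2 = 2 * (k + 1) from by ring]
  exact h

lemma xor_succ_even {m : Nat} (h : m % 2 = 0) : m ^^^ (m + 1) = 1 := by
  obtain ⟨k, rfl⟩ : ∃ k, m = 2 * k := ⟨m / 2, by omega⟩
  exact xor_double k

lemma xor_succ_odd {m : Nat} (h : m % 2 = 1) :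
    m ^^^ (m + 1) = 2 * ((m / 2) ^^^ (m / 2 + 1)) + 1 := by
  obtain ⟨k, rfl⟩ : ∃ k, m = 2 * k + 1 := ⟨m / 2, by omega⟩
  rw [show (2 * k + 1) / 2 = k from by omega, show 2 * k + 1 + 1 = 2 * k + 2 from by omega]
  exact xor_double_succ k

lemma bitLength_pos {x : Nat} (h : 0 < x) : 0 < PySem.Int.bitLength (x : Int) := by
  rw [PySem.Int.bitLength_natCast h]; omega

-- closed form: bit_length(m ^ (m+1)) - 1 = trailing-ones count
lemma bitLength_xor_succ (m : Nat) :
    PySem.Int.bitLength (((m ^^^ (m + 1) : Nat) : Int)) - 1 = tc m := by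
  rcases Nat.mod_two_eq_zero_or_one m with h | h
  · rw [xor_succ_even h, tc_even h]
    decide
  · rw [xor_succ_odd h, tc_odd h]
    have ih := bitLength_xor_succ (m / 2)
    set x := (m / 2) ^^^ (m / 2 + 1) with hx
    have hxpos : 0 < x := by
      rcases Nat.eq_zero_or_pos x with h0 | h0
      · exact absurd (Nat.xor_eq_zero_iff.mp (hx ▸ h0)) (by omega)
      · exact h0
    have hrec := PySem.Int.bitLength_natCast (m := 2 * x + 1) (by omega)
    rw [show (2 * x + 1) / 2 = x from by omega] at hrec
    rw [hrec]
    have := bitLength_pos hxpos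
    omega
termination_by m
decreasing_by omega

-- per-element agreement
lemma elem_eq (n : Int) :
    (let p := aWhile n 0
     let a1 := n + 2 ^ p.2
     if p.2 ≠ 0 then a1 - 2 ^ (p.2 - 1) else a1) =
    (let e : Nat := if n > 0 then PySem.Int.bitLength (PySem.Int.bxor n (n + 1)) - 1 else 0
     n + (if e = 0 then 1 else (1 : Int) <<< (e - 1))) := by
  have hsnd : (aWhile n 0).2 = tc n.toNat := by rw [aWhile_snd]; omega
  by_cases hp : n > 0
  · have hn : n = (n.toNat : Int) := by omega
    have hbx : PySem.Int.bxor n (n + 1) = ((n.toNat ^^^ (n.toNat + 1) : Nat) : Int) := by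
      conv_lhs => rw [hn]
      rw [show ((n.toNat : Int) + 1) = ((n.toNat + 1 : Nat) : Int) from by push_cast; ring,
          PySem.Int.bxor_natCast]
    have he : (if n > 0 then PySem.Int.bitLength (PySem.Int.bxor n (n + 1)) - 1 else 0) = tc n.toNat := by
      rw [if_pos hp, hbx, bitLength_xor_succ]
    simp only [he, hsnd]
    rcases Nat.eq_zero_or_pos (tc n.toNat) with h0 | h0
    · simp [h0]
    · have hne : tc n.toNat ≠ 0 := by omega
      rw [if_pos hne, if_neg hne]
      obtain ⟨k, hk⟩ : ∃ k, tc n.toNat = k + 1 := ⟨tc n.toNat - 1, by omega⟩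
      rw [hk]
      simp only [Nat.add_sub_cancel]
      rw [Int.shiftLeft_eq, pow_succ]
      ring
  · have h0 : n.toNat = 0 := by omega
    have ht : tc n.toNat = 0 := by rw [h0]; exact tc_even (by decide)
    simp [hp, hsnd, ht]

-- ===== VERDICT (by name: the statement is the Claim_ definition above) =====
theorem solution_spec : Claim_equal_solution := by
  intro numbers _
  unfold Spec_solution solution solution_alt
  apply List.map_congr_left
  intro n _
  exact elem_eq n
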